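-- pv_equiv track=rewrite | github.com/niralii24/training | stage5/consensus.py | build_consensus
-- ===== SOURCE A (Python) =====
-- from collections import Counter
--
-- def build_consensus(texts):
--
--     token_lists = [t.split() for t in texts]
--     max_len = max(len(t) for t in token_lists)
--
--     result = []
--
--     for i in range(max_len):
--         tokens_at_i = [tl[i] for tl in token_lists if i < len(tl)]
--
--         if not tokens_at_i:
--             continue
--
--         most_common = Counter(tokens_at_i).most_common(1)[0][0]
--         result.append(most_common)
--
--     return " ".join(result)
-- ===== SOURCE B (Python) =====
-- def build_consensus(texts):
--     # Single pass: bucket tokens by position, then pick the first-seen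
--     # token with the maximal count in each bucket.
--     buckets = []
--     for t in texts:
--         toks = t.split()
--         for i, tok in enumerate(toks):
--             if i == len(buckets):
--                 buckets.append([])
--             buckets[i].append(tok)
--     out = []
--     for b in buckets:
--         counts = {}
--         for tok in b:
--             counts[tok] = counts.get(tok, 0) + 1
--         out.append(max(counts, key=counts.get))
--     return " ".join(out)
-- ===== Notes on version B (the rewrite author's own statement) =====
-- stated objective: alternative
-- what changed: Instead of rescanning every token list at each position, B makes one pass over the tokens bucketing them by position, then picks each bucket's first-seen most frequent token.
import Mathlib
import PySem

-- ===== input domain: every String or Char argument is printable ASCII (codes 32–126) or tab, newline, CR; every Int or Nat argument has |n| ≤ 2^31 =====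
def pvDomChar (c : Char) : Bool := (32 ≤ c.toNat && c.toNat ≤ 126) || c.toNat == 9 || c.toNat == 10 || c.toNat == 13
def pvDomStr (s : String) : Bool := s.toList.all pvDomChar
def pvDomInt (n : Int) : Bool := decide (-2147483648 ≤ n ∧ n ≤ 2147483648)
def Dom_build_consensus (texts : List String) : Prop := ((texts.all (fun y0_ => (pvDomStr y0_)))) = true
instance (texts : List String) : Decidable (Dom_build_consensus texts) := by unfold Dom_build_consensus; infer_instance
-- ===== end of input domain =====

-- B replaces A's per-position rescan of all token lists by a single pass that buckets
-- tokens by position; same result, including the first-seen tie-break.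

-- ===== PORT A =====
def build_consensus (texts : List String) : String :=
  let token_lists := texts.map PySem.Str.split₀
  -- max(len(t) for t in token_lists): Python raises ValueError on an empty sequence
  match PySem.List.max? (token_lists.map (fun tl => (tl.length : Int))) (fun x => x) with
  | none => ""   -- texts = []: Python raises ValueError here; excluded by Pre_
  | some max_len =>
      let result : List String :=
        (PySem.List.pyRange 0 max_len).foldl
          (fun res i =>
            let tokens_at_i := token_lists.filterMap (fun tl => PySem.List.pyGet? tl i)
            if tokens_at_i.isEmpty then res
            else
              -- Counter(tokens_at_i).most_common(1)[0][0]: first item with maximal count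
              match PySem.List.max? (PySem.Dict.counter tokens_at_i).items (fun kv => kv.2) with
              | some kv => res ++ [kv.1]
              | none => res)
          []
      PySem.Str.join " " result

-- ===== PORT B =====
-- merge one text's tokens into the positional buckets (Source B's inner enumerate loop)
def pvAddTokens : List (List String) → List String → List (List String)
  | bs, [] => bs
  | [], t :: ts => [t] :: pvAddTokens [] ts
  | b :: bs, t :: ts => (b ++ [t]) :: pvAddTokens bs ts

-- Source B's per-bucket loop: count, then first key with maximal count
def pvBestOf (bucket : List String) : String :=
  let counts := bucket.foldl (fun d tok => d.insert tok (d.getD tok 0 + (1:Int))) PySem.Dict.empty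
  match PySem.List.max? counts.keys (fun k => counts.getD k 0) with
  | some k => k
  | none => ""   -- unreachable: every bucket built by pvAddTokens is nonempty

def build_consensus_alt (texts : List String) : String :=
  let buckets := texts.foldl (fun bs t => pvAddTokens bs (PySem.Str.split₀ t)) []
  PySem.Str.join " " (buckets.map pvBestOf)

-- ===== PRECONDITION & SPEC =====
-- Pre_ excludes only texts = [], on which Python A raises ValueError (max() of an empty sequence).
def Pre_build_consensus (texts : List String) : Prop := texts ≠ []
instance (texts : List String) : Decidable (Pre_build_consensus texts) := by unfold Pre_build_consensus; infer_instance
def pvWitness_build_consensus : List String := ["b a", "a"]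

def Spec_build_consensus (texts : List String) (out : String) : Prop := out = build_consensus_alt texts
instance (texts : List String) (out : String) : Decidable (Spec_build_consensus texts out) := by unfold Spec_build_consensus; infer_instance

-- ===== CLAIM (what is proved, stated in full; the proofs are below) =====
def Claim_equal_build_consensus : Prop := ∀ (texts : List String), Dom_build_consensus texts → Pre_build_consensus texts → Spec_build_consensus texts (build_consensus texts)

-- ===== LEMMAS AND PROOFS =====

-- tokens_at_i of A, as a function of the position
def pvGather (tls : List (List String)) (k : Nat) : List String :=
  tls.filterMap (fun tl => tl[k]?)

-- max? over a mapped list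
theorem pv_max?_map {α β κ : Type} [LT κ] [DecidableLT κ] (f : α → β) (key : β → κ) (xs : List α) :
    PySem.List.max? (xs.map f) key = Option.map f (PySem.List.max? xs (fun a => key (f a))) := by
  have h : ∀ (acc : Option α),
      List.foldl (fun acc b => match acc with | none => some b | some m => if key m < key b then some b else some m)
        (Option.map f acc) (xs.map f)
      = Option.map f (List.foldl (fun acc a => match acc with | none => some a | some m => if key (f m) < key (f a) then some a else some m) acc xs) := by
    induction xs with
    | nil => intro acc; simp
    | cons x t ih =>
      intro acc
      simp only [List.map_cons, List.foldl_cons]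
      have hstep : (match Option.map f acc with | none => some (f x) | some m => if key m < key (f x) then some (f x) else some m)
          = Option.map f (match acc with | none => some x | some m => if key (f m) < key (f x) then some x else some m) := by
        cases acc with
        | none => rfl
        | some m => simp only [Option.map_some]; split_ifs <;> rfl
      rw [hstep, ih]
  simpa [PySem.List.max?] using h none

-- pvAddTokens: pointwise description
theorem pvAddTokens_getD (bs : List (List String)) (ts : List String) (k : Nat) :
    (pvAddTokens bs ts).getD k [] = bs.getD k [] ++ (ts[k]?).toList := by
  induction ts generalizing bs k with
  | nil => cases bs <;> simp [pvAddTokens]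
  | cons t ts ih =>
    cases bs with
    | nil =>
      cases k with
      | zero => simp [pvAddTokens]
      | succ n => simp only [pvAddTokens]; simpa using ih [] n
    | cons b bs =>
      cases k with
      | zero => simp [pvAddTokens]
      | succ n => simp only [pvAddTokens]; simpa using ih bs n

theorem pvAddTokens_length (bs : List (List String)) (ts : List String) :
    (pvAddTokens bs ts).length = max bs.length ts.length := by
  induction ts generalizing bs with
  | nil => cases bs <;> simp [pvAddTokens]
  | cons t ts ih =>
    cases bs with
    | nil => simp [pvAddTokens, ih]
    | cons b bs => simp [pvAddTokens, ih, Nat.max_comm]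

-- the bucket fold, generalized over the accumulator
theorem pvBuckets_getD (tls : List (List String)) (bs : List (List String)) (k : Nat) :
    (tls.foldl pvAddTokens bs).getD k [] = bs.getD k [] ++ pvGather tls k := by
  induction tls generalizing bs with
  | nil => simp [pvGather]
  | cons t tls ih =>
    rw [List.foldl_cons, ih, pvAddTokens_getD]
    simp only [pvGather, List.filterMap_cons]
    cases h : t[k]?
    case none => simp
    case some v => simp

theorem pvBuckets_length (tls : List (List String)) (bs : List (List String)) :
    (tls.foldl pvAddTokens bs).length = (tls.map List.length).foldl max bs.length := by
  induction tls generalizing bs with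
  | nil => simp
  | cons t tls ih => simp [ih, pvAddTokens_length]

theorem pv_lt_foldl_max (l : List Nat) (a k : Nat) (h : k < l.foldl max a) :
    k < a ∨ ∃ x ∈ l, k < x := by
  induction l generalizing a with
  | nil => exact Or.inl h
  | cons x t ih =>
    rcases ih (max a x) h with h' | ⟨y, hy, hk⟩
    · rcases lt_max_iff.mp h' with h1 | h2
      · exact Or.inl h1
      · exact Or.inr ⟨x, List.mem_cons_self, h2⟩
    · exact Or.inr ⟨y, List.mem_cons_of_mem _ hy, hk⟩

-- the two selection procedures agree on a nonempty token list
theorem pv_choice (toks : List String) (h : toks ≠ []) :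
    ∃ m, PySem.List.max? (PySem.Dict.counter toks).items (fun kv => kv.2)
           = some (m, (List.count m toks : Int)) ∧ pvBestOf toks = m := by
  rw [PySem.Dict.items_counter,
      pv_max?_map (fun k => (k, (List.count k toks : Int))) (fun kv => kv.2)]
  have hne : PySem.Set.ofList toks ≠ [] := by
    cases toks with
    | nil => exact absurd rfl h
    | cons x t => exact List.ne_nil_of_mem ((PySem.Set.mem_ofList _ x).mpr List.mem_cons_self)
  obtain ⟨m, hm⟩ : ∃ m, PySem.List.max? (PySem.Set.ofList toks) (fun k => (List.count k toks : Int)) = some m := by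
    cases heq : PySem.List.max? (PySem.Set.ofList toks) (fun k => (List.count k toks : Int)) with
    | none => exact absurd ((PySem.List.max?_eq_none_iff _ _).mp heq) hne
    | some m => exact ⟨m, rfl⟩
  refine ⟨m, by rw [hm]; rfl, ?_⟩
  show (match PySem.List.max? (List.foldl (fun d tok => d.insert tok (d.getD tok 0 + (1:Int))) PySem.Dict.empty toks).keys
          (fun k => (List.foldl (fun d tok => d.insert tok (d.getD tok 0 + (1:Int))) PySem.Dict.empty toks).getD k 0) with
        | some k => k | none => "") = m
  rw [PySem.Dict.foldl_insert_getD_add_one_eq_counter, PySem.Dict.keys_counter]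
  have hkey : (fun k => (PySem.Dict.counter toks).getD k 0) = (fun k => (List.count k toks : Int)) :=
    funext fun k => PySem.Dict.getD_counter toks k
  rw [hkey, hm]

-- casting the running max
theorem pv_foldl_max_cast (tls : List (List String)) (a : Nat) :
    List.foldl max ((a : Nat) : Int) (tls.map (fun tl => ((tl.length : Nat) : Int)))
      = (((tls.map List.length).foldl max a : Nat) : Int) := by
  induction tls generalizing a with
  | nil => simp
  | cons x t ih =>
    simp only [List.map_cons, List.foldl_cons]
    rw [← Nat.cast_max, ih]

theorem pv_main (tls : List (List String)) (h : tls ≠ []) :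
    (match PySem.List.max? (tls.map (fun tl => (tl.length : Int))) (fun x => x) with
     | none => ""
     | some max_len =>
         PySem.Str.join " " ((PySem.List.pyRange 0 max_len).foldl
           (fun res i =>
             let tokens_at_i := tls.filterMap (fun tl => PySem.List.pyGet? tl i)
             if tokens_at_i.isEmpty then res
             else
               match PySem.List.max? (PySem.Dict.counter tokens_at_i).items (fun kv => kv.2) with
               | some kv => res ++ [kv.1]
               | none => res)
           []))
    = PySem.Str.join " " ((tls.foldl pvAddTokens []).map pvBestOf) := by
  obtain ⟨tl0, rest, rfl⟩ := List.exists_cons_of_ne_nil h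
  -- the Nat maximum length
  set n : Nat := (((tl0 :: rest).map List.length).foldl max 0) with hn
  have hmax : PySem.List.max? ((tl0 :: rest).map (fun tl => (tl.length : Int))) (fun x => x)
      = some ((n : Nat) : Int) := by
    rw [List.map_cons, PySem.List.max?_id_cons]
    have := pv_foldl_max_cast rest tl0.length
    rw [this, hn]
    simp
  rw [hmax]
  -- reduce the match on `some`
  show PySem.Str.join " " ((PySem.List.pyRange 0 ((n : Nat) : Int)).foldl
      (fun res i =>
        let tokens_at_i := (tl0 :: rest).filterMap (fun tl => PySem.List.pyGet? tl i)
        if tokens_at_i.isEmpty then res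
        else
          match PySem.List.max? (PySem.Dict.counter tokens_at_i).items (fun kv => kv.2) with
          | some kv => res ++ [kv.1]
          | none => res)
      [])
    = PySem.Str.join " " (((tl0 :: rest).foldl pvAddTokens []).map pvBestOf)
  rw [PySem.List.pyRange_zero_natCast, List.foldl_map]
  -- rewrite the loop body pointwise on `range n`
  rw [PySem.List.foldl_congr_mem (List.range n) _
        (fun res k => res ++ [pvBestOf (pvGather (tl0 :: rest) k)]) []
        (by
          intro res k hk
          have hkn : k < n := List.mem_range.mp hk
          have hne : pvGather (tl0 :: rest) k ≠ [] := by
            rcases pv_lt_foldl_max (((tl0 :: rest).map List.length)) 0 k (hn ▸ hkn) with h0 | ⟨x, hx, hkx⟩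
            · omega
            · obtain ⟨tl, htl, rfl⟩ := List.mem_map.mp hx
              exact List.ne_nil_of_mem (List.mem_filterMap.mpr ⟨tl, htl, List.getElem?_eq_getElem hkx⟩)
          have hgather : (tl0 :: rest).filterMap (fun tl => PySem.List.pyGet? tl ((k : Nat) : Int))
              = pvGather (tl0 :: rest) k := by
            simp only [PySem.List.pyGet?_natCast, pvGather]
          simp only [hgather]
          rw [if_neg (by simp [List.isEmpty_iff, hne])]
          obtain ⟨m, hm, hbest⟩ := pv_choice (pvGather (tl0 :: rest) k) hne
          rw [hm, hbest])]
  rw [PySem.List.foldl_append_singleton_eq_map (fun k => pvBestOf (pvGather (tl0 :: rest) k)) (List.range n) []]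
  -- identify the buckets with the gathered positions
  have hbuck : (tl0 :: rest).foldl pvAddTokens [] = (List.range n).map (pvGather (tl0 :: rest)) := by
    have hlen : ((tl0 :: rest).foldl pvAddTokens []).length = n := by
      rw [pvBuckets_length]; rfl
    apply List.ext_getElem (by simp only [List.length_map, List.length_range, hlen])
    intro k hk1 hk2
    have := pvBuckets_getD (tl0 :: rest) [] k
    rw [List.getD_eq_getElem _ _ hk1] at this
    simp only [List.getElem_map, List.getElem_range]
    simpa using this
  rw [hbuck, List.map_map]
  rfl

-- ===== VERDICT (by name: the statement is the Claim_ definition above) =====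
theorem build_consensus_spec : Claim_equal_build_consensus := by
  intro texts _ hpre
  unfold Spec_build_consensus build_consensus build_consensus_alt
  have hb : texts.foldl (fun bs t => pvAddTokens bs (PySem.Str.split₀ t)) []
      = (texts.map PySem.Str.split₀).foldl pvAddTokens [] := (List.foldl_map).symm
  rw [hb]
  exact pv_main (texts.map PySem.Str.split₀) (by simpa using hpre)
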